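-- pv_equiv track=rewrite | github.com/yuchenWYC/CSC148_python | assignments/a2/stonehenge.py | cell_list
-- ===== SOURCE A (Python) =====
-- from typing import Any, List, Union
--
-- def cell_list(size: int) -> List[List[str]]:
--     """
--     Return a cell list generated according to size. The cell list is used
--     when initizing a new StonehengeGame.
--     """
--     alpha_list = ['A', 'B', 'C', 'D', 'E', 'F', 'G', 'H', 'I', 'J', 'K',
--                   'L', 'M', 'N', 'O', 'P', 'Q', 'R', 'S', 'T', 'U', 'V',
--                   'W', 'X', 'Y', 'Z']
--     start, end = 0, 1
--     result = []
--     for i in range(2, size + 2):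
--         line = alpha_list[start: end + 1]
--         result.append(line)
--         start = end + 1
--         end = start + i
--     last_line = alpha_list[start: start + size]
--     result.append(last_line)
--     return result
-- ===== SOURCE B (Python) =====
-- def cell_list(size):
--     """Single-pass consumer: generate the letters from character codes and
--     walk ONE index over them, filling each row element-by-element until the
--     row is full or the letters run out, instead of cutting slices out of a
--     list."""
--     letters = [chr(65 + k) for k in range(26)]
--     rows = []
--     i = 0
--     for length in list(range(2, size + 2)) + [size]:
--         row = []
--         while len(row) < length and i < len(letters):
--             row.append(letters[i])
--             i += 1
--         rows.append(row)
--     return rows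
-- ===== Notes on version B (the rewrite author's own statement) =====
-- stated objective: alternative
-- what changed: Instead of cutting contiguous slices out of a fixed alphabet list, B generates the letters from character codes and consumes them with a single running index, a while loop filling each row element-by-element until the row is full or the letters run out (truncation happens by exhausting the letters, not by slice clamping).
-- outside the precondition, e.g. on cell_list(-14): A returns [['A', 'B', 'C', 'D', 'E', 'F', 'G', 'H', 'I', 'J', 'K', 'L']], B returns [[]]
import Mathlib
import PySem

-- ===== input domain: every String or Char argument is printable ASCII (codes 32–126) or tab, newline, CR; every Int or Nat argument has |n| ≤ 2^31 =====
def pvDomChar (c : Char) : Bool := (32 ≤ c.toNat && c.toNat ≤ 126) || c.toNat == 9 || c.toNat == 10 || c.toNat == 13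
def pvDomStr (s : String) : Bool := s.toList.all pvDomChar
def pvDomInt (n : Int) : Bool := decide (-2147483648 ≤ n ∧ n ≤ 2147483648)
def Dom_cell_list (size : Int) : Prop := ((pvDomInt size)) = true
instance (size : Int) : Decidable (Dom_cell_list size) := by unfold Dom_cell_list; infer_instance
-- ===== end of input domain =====

-- B replaces A's slice extraction with a single-pass consumer: the letters are
-- generated from character codes and one running index fills each row
-- element-by-element under an explicit bounds guard (objective: alternative).

-- ===== PORT A =====
def pvAlpha : List String :=
  ["A", "B", "C", "D", "E", "F", "G", "H", "I", "J", "K",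
   "L", "M", "N", "O", "P", "Q", "R", "S", "T", "U", "V",
   "W", "X", "Y", "Z"]

def cell_list (size : Int) : List (List String) :=
  let alpha_list := pvAlpha
  let st :=
    (PySem.List.pyRange 2 (size + 2) 1).foldl
      (fun (st : Int × Int × List (List String)) i =>
        let line := PySem.List.slice alpha_list (some st.1) (some (st.2.1 + 1))
        (st.2.1 + 1, st.2.1 + 1 + i, st.2.2 ++ [line]))
      (0, 1, [])
  st.2.2 ++ [PySem.List.slice alpha_list (some st.1) (some (st.1 + size))]

-- ===== PORT B =====
-- letters = [chr(65 + k) for k in range(26)]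
def pvLetters : List String :=
  (PySem.List.pyRange 0 26 1).map (fun k => String.ofList [Char.ofNat (65 + k).toNat])

-- the inner while loop: while len(row) < length and i < len(letters): row.append(letters[i]); i += 1
def pvFill (length : Int) (st : Int × List String) : Int × List String :=
  if _h : (st.2.length : Int) < length ∧ st.1 < (pvLetters.length : Int) then
    pvFill length (st.1 + 1, st.2 ++ [(PySem.List.pyGet? pvLetters st.1).getD ""])
  else st
termination_by length.toNat - st.2.length
decreasing_by simp; omega

-- body of the outer loop over the row lengths
def pvOuterStep (st : Int × List (List String)) (length : Int) :
    Int × List (List String) :=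
  let inner := pvFill length (st.1, [])
  (inner.1, st.2 ++ [inner.2])

def cell_list_alt (size : Int) : List (List String) :=
  ((PySem.List.pyRange 2 (size + 2) 1 ++ [size]).foldl pvOuterStep (0, [])).2

-- ===== PRECONDITION & SPEC =====
-- Pre_ excludes a band of negative board sizes on which A still returns: there A's
-- single row is a nonempty alphabet slice produced by a negative stop index, an accident
-- of Python slicing that B's letter-consuming loop does not reproduce; for every other
-- size (all natural sizes, and negatives large enough that the slice is empty) A = B.
def Pre_cell_list (size : Int) : Prop := 0 ≤ size ∨ size ≤ -26
instance (size : Int) : Decidable (Pre_cell_list size) := by unfold Pre_cell_list; infer_instance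

def pvWitness_cell_list : Int := 3

def Spec_cell_list (size : Int) (out : List (List String)) : Prop := out = cell_list_alt size
instance (size : Int) (out : List (List String)) : Decidable (Spec_cell_list size out) := by unfold Spec_cell_list; infer_instance

-- ===== CLAIM (what is proved, stated in full; the proofs are below) =====
def Claim_equal_cell_list : Prop := ∀ (size : Int), Dom_cell_list size → Pre_cell_list size → Spec_cell_list size (cell_list size)

-- ===== LEMMAS AND PROOFS =====

-- T r = (r+1)(r+2)/2; row r of the board starts at offset T r - 1 and ends at T (r+1) - 1.
def pvT (r : Int) : Int := ((r + 1) * (r + 2)) / 2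

lemma pvT_succ (r : Int) : pvT (r + 1) = pvT r + (r + 2) := by
  unfold pvT
  have h : (r + 1 + 1) * (r + 1 + 2) = (r + 1) * (r + 2) + (r + 2) * 2 := by ring
  rw [h, Int.add_mul_ediv_right _ _ (by norm_num : (2:Int) ≠ 0)]

def pvRow (r : Int) : List String :=
  PySem.List.slice pvAlpha (some (pvT r - 1)) (some (pvT (r + 1) - 1))

-- Invariant of A's loop: after the iterations for i = 2 .. n+1, start = T n - 1,
-- end = T (n+1) - 2, and the rows 0 .. n-1 have been appended.
lemma pvLoopA_inv (n : Nat) (acc : List (List String)) :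
    (PySem.List.pyRange 2 ((n : Int) + 2) 1).foldl
      (fun (st : Int × Int × List (List String)) i =>
        let line := PySem.List.slice pvAlpha (some st.1) (some (st.2.1 + 1))
        (st.2.1 + 1, st.2.1 + 1 + i, st.2.2 ++ [line]))
      (0, 1, acc)
    = (pvT n - 1, pvT (n + 1) - 2,
       acc ++ (PySem.List.pyRange 0 (n : Int) 1).map pvRow) := by
  induction n with
  | zero =>
      simp [PySem.List.pyRange_one_eq_nil, pvT]
  | succ m ih =>
      have h1 : ((m + 1 : Nat) : Int) + 2 = ((m : Int) + 2) + 1 := by push_cast; ring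
      have h2 : ((m + 1 : Nat) : Int) = (m : Int) + 1 := by push_cast; ring
      rw [h1, PySem.List.pyRange_one_succ_right (by omega), List.foldl_append, ih,
          h2, PySem.List.pyRange_one_succ_right (by omega)]
      simp only [List.foldl_cons, List.foldl_nil]
      have hE : pvT ((m : Int) + 1) - 2 + 1 = pvT ((m : Int) + 1) - 1 := by ring
      refine Prod.ext ?_ (Prod.ext ?_ ?_)
      · simp only; omega
      · simp only
        rw [pvT_succ ((m : Int) + 1)]
        ring
      · simp only [List.map_append, List.map_cons, List.map_nil, List.append_assoc]
        congr 2
        unfold pvRow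
        rw [hE]

-- the generated letters are exactly the alphabet A hard-codes
lemma pvLetters_eq : pvLetters = pvAlpha := by decide

-- Nat version of the triangular offset
def pvNT (m : Nat) : Nat := (m + 1) * (m + 2) / 2

lemma pvNT_succ (m : Nat) : pvNT (m + 1) = pvNT m + (m + 2) := by
  unfold pvNT
  have h : (m + 1 + 1) * (m + 1 + 2) = (m + 1) * (m + 2) + (m + 2) * 2 := by ring
  rw [h, Nat.add_mul_div_right _ _ (by norm_num : 0 < 2)]

lemma pvNT_pos (m : Nat) : 1 ≤ pvNT m := by
  unfold pvNT
  rw [Nat.le_div_iff_mul_le (by norm_num)]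
  nlinarith

lemma pvT_natCast (m : Nat) : pvT (m : Int) = (pvNT m : Int) := by
  unfold pvT pvNT
  rw [Int.natCast_div]
  push_cast
  ring_nf

-- B's running index after the first r rows
def pvNS : Nat → Nat
  | 0 => 0
  | m + 1 => min 26 (pvNS m + (m + 2))

lemma pvNS_le (m : Nat) : pvNS m ≤ 26 := by
  cases m <;> simp [pvNS]

lemma pvNS_eq (r : Nat) : pvNS r = min 26 (pvNT r - 1) := by
  induction r with
  | zero => simp [pvNS, pvNT]
  | succ m ih =>
      have h1 := pvNT_succ m
      have h2 := pvNT_pos m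
      simp only [pvNS, ih]
      omega

lemma pvDrop_min (x : Nat) : pvAlpha.drop (min 26 x) = pvAlpha.drop x := by
  rcases le_total x 26 with h | h
  · rw [min_eq_right h]
  · rw [min_eq_left h, List.drop_eq_nil_of_le (by simp [pvAlpha]),
        List.drop_eq_nil_of_le (by simp [pvAlpha]; omega)]

-- Invariant of B's inner while loop: with k letters still wanted and index i,
-- it appends the next k available letters and advances the index, clamped at 26.
lemma pvFill_inv (k : Nat) : ∀ (i : Nat), i ≤ 26 → ∀ (L : Nat) (row : List String),
    L = row.length + k →
    pvFill (L : Int) ((i : Int), row)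
    = (((min 26 (i + k) : Nat) : Int), row ++ (pvAlpha.drop i).take k) := by
  induction k with
  | zero =>
      intro i hi L row hL
      rw [pvFill]
      rw [dif_neg (by simp; intro h; omega)]
      simp [Nat.min_eq_right hi]
  | succ k ih =>
      intro i hi L row hL
      have hlen : pvLetters.length = 26 := by decide
      by_cases hcase : i < 26
      · rw [pvFill, dif_pos (by
          refine ⟨?_, ?_⟩
          · show ((row.length : Nat) : Int) < (L : Int)
            exact_mod_cast (by omega : row.length < L)
          · show (i : Int) < (pvLetters.length : Int)
            rw [hlen]
            exact_mod_cast hcase)]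
        have hget : (PySem.List.pyGet? pvLetters (i : Int)).getD ""
            = pvAlpha[i]'(by simp [pvAlpha]; omega) := by
          rw [pvLetters_eq, PySem.List.pyGet?_natCast,
              List.getElem?_eq_getElem (by simp [pvAlpha]; omega : i < pvAlpha.length)]
          rfl
        have hrec := ih (i + 1) (by omega) L
            (row ++ [pvAlpha[i]'(by simp [pvAlpha]; omega)]) (by simp; omega)
        rw [show (i : Int) + 1 = ((i + 1 : Nat) : Int) by push_cast; ring, hget, hrec]
        refine Prod.ext ?_ ?_
        · simp only
          congr 1
          omega
        · simp only [List.append_assoc]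
          congr 1
          rw [show (pvAlpha.drop i) = pvAlpha[i]'(by simp [pvAlpha]; omega) :: pvAlpha.drop (i + 1)
                from List.drop_eq_getElem_cons (by simp [pvAlpha]; omega),
              List.take_succ_cons, List.singleton_append]
      · rw [pvFill, dif_neg (by
          intro hcon
          have h2 : (i : Int) < (pvLetters.length : Int) := hcon.2
          rw [hlen] at h2
          have : i < 26 := by exact_mod_cast h2
          omega)]
        have hi26 : i = 26 := by omega
        refine Prod.ext ?_ ?_
        · simp only
          congr 1
          omega
        · simp only
          rw [hi26, List.drop_eq_nil_of_le (by simp [pvAlpha])]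
          simp

-- Invariant of B's outer loop over the row lengths 2 .. n+1
lemma pvLoopB_inv (n : Nat) :
    (PySem.List.pyRange 2 ((n : Int) + 2) 1).foldl pvOuterStep (0, [])
    = (((pvNS n : Nat) : Int),
       (List.range n).map (fun r => (pvAlpha.drop (pvNS r)).take (r + 2))) := by
  induction n with
  | zero =>
      rw [PySem.List.pyRange_one_eq_nil (by omega)]
      simp [pvNS]
  | succ m ih =>
      have h1 : ((m + 1 : Nat) : Int) + 2 = ((m : Int) + 2) + 1 := by push_cast; ring
      rw [h1, PySem.List.pyRange_one_succ_right (by omega), List.foldl_append, ih]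
      simp only [List.foldl_cons, List.foldl_nil, pvOuterStep]
      have h2 : (m : Int) + 2 = ((m + 2 : Nat) : Int) := by push_cast; ring
      rw [h2, pvFill_inv (m + 2) (pvNS m) (pvNS_le m) (m + 2) [] (by simp)]
      refine Prod.ext ?_ ?_
      · simp only
        norm_cast
      · simp only [List.nil_append, List.range_succ, List.map_append, List.map_cons,
          List.map_nil]

-- A's row r equals B's row r
lemma pvRow_eq (r : Nat) : pvRow (r : Int) = (pvAlpha.drop (pvNS r)).take (r + 2) := by
  unfold pvRow
  have hc : (r : Int) + 1 = ((r + 1 : Nat) : Int) := by push_cast; ring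
  have h1 : pvT (r : Int) - 1 = ((pvNT r - 1 : Nat) : Int) := by
    rw [pvT_natCast]
    have := pvNT_pos r
    omega
  have h2 : pvT ((r : Int) + 1) - 1 = ((pvNT r - 1 + (r + 2) : Nat) : Int) := by
    rw [hc, pvT_natCast]
    have := pvNT_succ r
    have := pvNT_pos r
    omega
  rw [h1, h2, PySem.List.slice_natCast]
  rw [pvNS_eq, pvDrop_min]
  congr 1
  omega

-- ===== VERDICT (by name: the statement is the Claim_ definition above) =====
theorem cell_list_spec : Claim_equal_cell_list := by
  intro size _ hpre
  show cell_list size = cell_list_alt size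
  rcases hpre with hpos | hneg
  case inr =>
    obtain ⟨k, rfl, hk⟩ : ∃ k : Nat, size = -(k : Int) ∧ 26 ≤ k :=
      ⟨(-size).toNat, by omega, by omega⟩
    unfold cell_list cell_list_alt
    rw [PySem.List.pyRange_one_eq_nil (by omega)]
    simp only [List.foldl_nil, List.nil_append, List.foldl_cons, pvOuterStep]
    rw [pvFill, dif_neg (by intro hcon; have h1 := hcon.1; simp at h1; omega)]
    rw [show (0 : Int) + -(k : Int) = -(k : Int) from by ring,
        PySem.List.slice_zero_start,
        PySem.List.slice_to_neg_natCast pvAlpha k (by omega : 0 < k),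
        show pvAlpha.length - k = 0 from by simp [pvAlpha]; omega,
        List.take_zero]
  obtain ⟨n, rfl⟩ := Int.eq_ofNat_of_zero_le hpos
  unfold cell_list cell_list_alt
  rw [List.foldl_append, pvLoopB_inv n]
  simp only [pvLoopA_inv n [], List.nil_append, List.foldl_cons, List.foldl_nil,
    pvOuterStep]
  rw [pvFill_inv n (pvNS n) (pvNS_le n) n [] (by simp)]
  simp only [List.nil_append]
  congr 1
  · rw [PySem.List.pyRange_zero_nat, List.map_map]
    apply List.map_congr_left
    intro r _
    exact pvRow_eq r
  · congr 1
    have h1 : pvT (n : Int) - 1 = ((pvNT n - 1 : Nat) : Int) := by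
      rw [pvT_natCast]
      have := pvNT_pos n
      omega
    have h3 : ((pvNT n - 1 : Nat) : Int) + (n : Int) = ((pvNT n - 1 + n : Nat) : Int) := by
      push_cast; ring
    rw [h1, h3, PySem.List.slice_natCast, pvNS_eq, pvDrop_min]
    congr 1
    omega
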